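-- pv_equiv track=rewrite | github.com/MiraWelner/food_embedding_validator | find_hops.py | distance_c
-- ===== SOURCE A (Python) =====
-- def distance_c(path1, path2):
--     total = 0
--     diverged = 0
--     for i in range(min(len(path1), len(path2))):  # finds depth of divergence
--         if path1[i] != path2[i]:
--             total += i
--             diverged = i
--             break
--     if diverged != 0:
--         for j in range(1, len(path1)):
--             total -= j
--         for k in range(1, len(path2)):
--             total -= k
--     if not diverged:
--         return len(path1)
--     return total
-- ===== SOURCE B (Python) =====
-- def distance_c(path1, path2):
--     i = 0
--     for x, y in zip(path1, path2):
--         if x != y: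
--             if i == 0:
--                 return len(path1)
--             n, m = len(path1), len(path2)
--             return i - n * (n - 1) // 2 - m * (m - 1) // 2
--         i += 1
--     return len(path1)
-- ===== Notes on version B (the rewrite author's own statement) =====
-- stated objective: simpler
-- what changed: B walks the zipped paths once with an early return and replaces A's two subtraction loops over range(1, len) by the Gauss closed form n*(n-1)//2, reproducing A's quirk of returning len(path1) when no divergence is found or the first mismatch is at index 0.
import Mathlib
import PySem

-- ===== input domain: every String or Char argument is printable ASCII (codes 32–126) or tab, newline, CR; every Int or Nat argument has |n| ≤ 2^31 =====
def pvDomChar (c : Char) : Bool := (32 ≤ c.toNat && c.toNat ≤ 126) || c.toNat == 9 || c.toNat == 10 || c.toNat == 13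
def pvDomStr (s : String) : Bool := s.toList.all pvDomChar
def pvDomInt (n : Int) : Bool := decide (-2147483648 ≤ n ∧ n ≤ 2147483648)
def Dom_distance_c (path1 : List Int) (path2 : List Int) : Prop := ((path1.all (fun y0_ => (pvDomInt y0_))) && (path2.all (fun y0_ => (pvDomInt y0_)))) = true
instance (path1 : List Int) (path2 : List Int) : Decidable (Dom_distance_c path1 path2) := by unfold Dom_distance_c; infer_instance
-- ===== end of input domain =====

-- B scans the zipped paths once with early return and replaces A's two subtraction
-- loops by the Gauss closed form n*(n-1)//2 (objective: simpler).


-- ===== PORT A =====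
-- the 'for i in range(min(len1,len2)) … break' loop: returns (total, diverged)
def distanceALoop (p1 p2 : List Int) (m i : Nat) : Int × Int :=
  if i < m then
    if PySem.List.pyGet? p1 (i : Int) ≠ PySem.List.pyGet? p2 (i : Int) then
      ((0 : Int) + (i : Int), (i : Int))   -- total += i; diverged = i; break
    else distanceALoop p1 p2 m (i + 1)
  else ((0 : Int), (0 : Int))
  termination_by m - i

def distance_c (path1 : List Int) (path2 : List Int) : Int :=
  let td := distanceALoop path1 path2 (min path1.length path2.length) 0
  let total := td.1
  let diverged := td.2
  let total :=
    if diverged ≠ 0 then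
      let t1 := (PySem.List.pyRange 1 (path1.length : Int) 1).foldl (fun t j => t - j) total
      (PySem.List.pyRange 1 (path2.length : Int) 1).foldl (fun t k => t - k) t1
    else total
  if diverged = 0 then (path1.length : Int) else total

-- ===== PORT B =====
-- the 'for x, y in zip(path1, path2)' loop of Source B, carrying the counter i
def distanceBLoop (path1 path2 : List Int) (i : Nat) : List (Int × Int) → Int
  | [] => (path1.length : Int)
  | (x, y) :: rest =>
    if x ≠ y then
      if i = 0 then (path1.length : Int)
      else
        let n := path1.length
        let m := path2.length
        (i : Int) - ((n * (n - 1) / 2 : Nat) : Int) - ((m * (m - 1) / 2 : Nat) : Int)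
    else distanceBLoop path1 path2 (i + 1) rest

def distance_c_alt (path1 : List Int) (path2 : List Int) : Int :=
  distanceBLoop path1 path2 0 (path1.zip path2)

-- ===== PRECONDITION & SPEC =====
def Spec_distance_c (path1 : List Int) (path2 : List Int) (out : Int) : Prop := out = distance_c_alt path1 path2
instance (path1 : List Int) (path2 : List Int) (out : Int) : Decidable (Spec_distance_c path1 path2 out) := by unfold Spec_distance_c; infer_instance

-- ===== CLAIM (what is proved, stated in full; the proofs are below) =====
def Claim_equal_distance_c : Prop := ∀ (path1 : List Int) (path2 : List Int), Dom_distance_c path1 path2 → Spec_distance_c path1 path2 (distance_c path1 path2)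

-- ===== LEMMAS AND PROOFS =====

-- index (within the zipped list) of the first mismatching pair
def firstDiff : List (Int × Int) → Option Nat
  | [] => none
  | (x, y) :: rest => if x ≠ y then some 0 else (firstDiff rest).map (· + 1)

theorem gauss_foldl (n : Nat) :
    ∀ t : Int, (PySem.List.pyRange 1 (n : Int) 1).foldl (fun t j => t - j) t
      = t - ((n * (n - 1) / 2 : Nat) : Int) := by
  induction n with
  | zero => intro t; rw [PySem.List.pyRange_one_eq_nil (by norm_num)]; simp
  | succ k ih =>
    intro t
    rcases Nat.eq_zero_or_pos k with hk | hk
    · subst hk; rw [show ((1:Nat):Int) = 1 by norm_num,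
        PySem.List.pyRange_one_eq_nil (by norm_num)]; simp
    · rw [show ((k+1 : Nat) : Int) = (k : Int) + 1 by push_cast; ring,
        PySem.List.pyRange_one_succ_right (by exact_mod_cast hk), List.foldl_append, ih]
      simp only [List.foldl_cons, List.foldl_nil]
      have hmul : (k + 1) * k = k * (k - 1) + k * 2 := by
        cases k with
        | zero => rfl
        | succ j => simp only [Nat.succ_sub_one]; ring
      have h2 : (k + 1) * k / 2 = k * (k - 1) / 2 + k := by omega
      simp only [Nat.add_sub_cancel, h2]
      push_cast
      ring

theorem aLoop_spec (p1 p2 : List Int) (i : Nat) :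
    distanceALoop p1 p2 (min p1.length p2.length) i =
      match firstDiff ((p1.drop i).zip (p2.drop i)) with
      | none => ((0 : Int), (0 : Int))
      | some k => (((i + k : Nat) : Int), ((i + k : Nat) : Int)) := by
  generalize hM : min p1.length p2.length = M
  induction hfu : M - i using Nat.strong_induction_on generalizing i with
  | _ fu ih =>
  by_cases h : i < M
  · have h1 : i < p1.length := lt_of_lt_of_le h (hM ▸ Nat.min_le_left _ _)
    have h2 : i < p2.length := lt_of_lt_of_le h (hM ▸ Nat.min_le_right _ _)
    have hd1 : p1.drop i = p1[i] :: p1.drop (i + 1) := List.drop_eq_getElem_cons h1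
    have hd2 : p2.drop i = p2[i] :: p2.drop (i + 1) := List.drop_eq_getElem_cons h2
    rw [distanceALoop, if_pos h]
    rw [PySem.List.pyGet?_natCast, PySem.List.pyGet?_natCast,
      List.getElem?_eq_getElem h1, List.getElem?_eq_getElem h2]
    by_cases hne : p1[i] ≠ p2[i]
    · rw [if_pos (by simpa using hne)]
      rw [hd1, hd2, List.zip_cons_cons]
      simp only [firstDiff, ne_eq, hne, not_false_eq_true, if_true, Nat.add_zero]
      norm_num
    · rw [if_neg (by simpa using hne)]
      rw [ih (M - (i+1)) (by omega) (i+1) rfl]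
      rw [not_not] at hne
      rw [hd1, hd2, List.zip_cons_cons]
      simp only [firstDiff, ne_eq, hne, not_true_eq_false, if_false]
      cases hfd : firstDiff ((p1.drop (i+1)).zip (p2.drop (i+1))) with
      | none => simp
      | some k =>
        simp only [Option.map_some]
        have hik : i + 1 + k = i + (k + 1) := by omega
        rw [hik]
  · rw [distanceALoop, if_neg h]
    have hz : (p1.drop i).zip (p2.drop i) = [] := by
      apply List.eq_nil_of_length_eq_zero
      rw [List.length_zip, List.length_drop, List.length_drop]
      omega
    rw [hz]
    rfl

theorem bLoop_spec (p1 p2 : List Int) :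
    ∀ (l : List (Int × Int)) (i : Nat), distanceBLoop p1 p2 i l =
      match firstDiff l with
      | none => (p1.length : Int)
      | some k =>
        if i + k = 0 then (p1.length : Int)
        else ((i + k : Nat) : Int)
          - ((p1.length * (p1.length - 1) / 2 : Nat) : Int)
          - ((p2.length * (p2.length - 1) / 2 : Nat) : Int) := by
  intro l
  induction l with
  | nil => intro i; rfl
  | cons hd tl ih =>
    intro i
    obtain ⟨x, y⟩ := hd
    by_cases hne : x ≠ y
    · simp only [distanceBLoop, firstDiff, if_pos hne, Nat.add_zero]
    · simp only [distanceBLoop, firstDiff, if_neg hne, ih (i + 1)]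
      cases hfd : firstDiff tl with
      | none => rfl
      | some k =>
        simp only [Option.map_some]
        have hik : i + 1 + k = i + (k + 1) := by omega
        rw [hik]

-- ===== VERDICT (by name: the statement is the Claim_ definition above) =====
theorem distance_c_spec : Claim_equal_distance_c := by
  intro p1 p2 _
  unfold Spec_distance_c distance_c distance_c_alt
  rw [aLoop_spec p1 p2 0, bLoop_spec p1 p2 (p1.zip p2) 0]
  simp only [List.drop_zero]
  cases hfd : firstDiff (p1.zip p2) with
  | none => simp
  | some k =>
    by_cases hk : k = 0
    · subst hk; simp
    · simp only [Nat.zero_add]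
      rw [if_neg hk]
      have hknz : ((k : Nat) : Int) ≠ 0 := by exact_mod_cast hk
      simp only [ne_eq, hknz, not_false_eq_true, if_true, if_false]
      rw [gauss_foldl, gauss_foldl]
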